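-- pv_equiv track=rewrite | github.com/ghazalehnt/CUP | calc_results_user_item_grps.py | group_item_threshold
-- ===== SOURCE A (Python) =====
-- def group_item_threshold(train_item_count, thresholds):
--     groups = {thr: set() for thr in sorted(thresholds)}
--     if len(thresholds) > 0:
--         groups['rest'] = set()
--         for item in train_item_count:
--             added = False
--             for thr in sorted(thresholds):
--                 if train_item_count[item] <= thr:
--                     groups[thr].add(str(item))
--                     added = True
--                     break
--             if not added:
--                 groups['rest'].add(str(item))
--
--     ret_group = {}
--     for gr in groups:
--         if gr == 0:
--             new_gr = "unseen"
--         elif gr == 'rest':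
--             new_gr = "seen"
--         else:
--             new_gr = f"niche{gr}"
--         ret_group[new_gr] = groups[gr]
--     return ret_group
-- ===== SOURCE B (Python) =====
-- def _bisect_left(srt, cnt):
--     lo, hi = 0, len(srt)
--     while lo < hi:
--         mid = (lo + hi) // 2
--         if srt[mid] < cnt:
--             lo = mid + 1
--         else:
--             hi = mid
--     return lo
--
--
-- def group_item_threshold(train_item_count, thresholds):
--     if not thresholds:
--         return {}
--     srt = sorted(set(thresholds))
--     buckets = [set() for _ in srt]
--     rest = set()
--     for item, cnt in train_item_count.items():
--         i = _bisect_left(srt, cnt)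
--         if i < len(srt):
--             buckets[i].add(str(item))
--         else:
--             rest.add(str(item))
--     out = {}
--     for thr, b in zip(srt, buckets):
--         out["unseen" if thr == 0 else f"niche{thr}"] = b
--     out["seen"] = rest
--     return out
-- ===== Notes on version B (the rewrite author's own statement) =====
-- stated objective: faster
-- what changed: Instead of re-sorting the thresholds and linearly scanning them for every item, B sorts the distinct thresholds once and binary-searches (hand-rolled bisect_left) for each item's bucket, updating an indexed bucket list.
import Mathlib
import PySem

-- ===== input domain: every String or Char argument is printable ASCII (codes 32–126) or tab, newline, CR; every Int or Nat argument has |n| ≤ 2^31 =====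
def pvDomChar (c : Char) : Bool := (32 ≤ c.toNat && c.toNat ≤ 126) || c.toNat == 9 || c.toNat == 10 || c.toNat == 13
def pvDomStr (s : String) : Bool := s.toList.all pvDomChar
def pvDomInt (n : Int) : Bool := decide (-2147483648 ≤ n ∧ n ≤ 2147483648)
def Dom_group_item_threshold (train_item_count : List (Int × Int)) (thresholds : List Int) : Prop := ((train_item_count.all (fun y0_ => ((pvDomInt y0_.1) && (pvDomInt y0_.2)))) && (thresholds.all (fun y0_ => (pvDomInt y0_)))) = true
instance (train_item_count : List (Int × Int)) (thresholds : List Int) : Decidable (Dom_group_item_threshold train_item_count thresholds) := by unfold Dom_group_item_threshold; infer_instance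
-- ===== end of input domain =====

-- B replaces A's per-item re-sort + linear scan of the thresholds by one sort of the
-- distinct thresholds and a per-item binary search into an indexed bucket list (objective: faster).

-- ===== PORT A =====

-- the mixed-type keys of A's 'groups' dict: the int thresholds and the string 'rest'
inductive GKey
  | thr : Int → GKey
  | rest
deriving DecidableEq, Repr

-- A's inner 'for thr in sorted(thresholds): if cnt <= thr: add; break' loop with its 'added' flag
def pvAddItemA (g : PySem.Dict GKey (PySem.Set String)) (item cnt : Int) :
    List Int → PySem.Dict GKey (PySem.Set String)
  | [] => g.modify GKey.rest PySem.Set.empty (fun s => PySem.Set.add s (PySem.Int.toStr item))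
  | thr :: rest =>
      if cnt ≤ thr then
        g.modify (GKey.thr thr) PySem.Set.empty (fun s => PySem.Set.add s (PySem.Int.toStr item))
      else pvAddItemA g item cnt rest

-- 'if gr == 0: "unseen" elif gr == "rest": "seen" else f"niche{gr}"'
def pvNameA (gr : GKey) : String :=
  match gr with
  | GKey.thr t => if t = 0 then "unseen" else "niche" ++ PySem.Int.toStr t
  | GKey.rest => "seen"

def group_item_threshold (train_item_count : List (Int × Int)) (thresholds : List Int) : List (String × List String) :=
  let d := PySem.Dict.ofList train_item_count
  let groups0 : PySem.Dict GKey (PySem.Set String) :=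
    (PySem.List.sorted thresholds (fun x => x)).foldl
      (fun g thr => g.insert (GKey.thr thr) PySem.Set.empty) PySem.Dict.empty
  let groups :=
    if thresholds.length > 0 then
      d.keys.foldl
        (fun g item => pvAddItemA g item (d.getD item 0) (PySem.List.sorted thresholds (fun x => x)))
        (groups0.insert GKey.rest PySem.Set.empty)
    else groups0
  (groups.keys.foldl
    (fun r gr => r.insert (pvNameA gr) (groups.getD gr PySem.Set.empty))
    PySem.Dict.empty).items

-- ===== PORT B =====

-- Source B's hand-written bisect_left loop ('while lo < hi: …')
def pvBisectLoop (srt : List Int) (cnt : Int) (lo hi : Nat) : Nat :=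
  if h : lo < hi then
    let mid := (lo + hi) / 2
    if srt.getD mid 0 < cnt then pvBisectLoop srt cnt (mid + 1) hi
    else pvBisectLoop srt cnt lo mid
  else lo
termination_by hi - lo
decreasing_by all_goals omega

def group_item_threshold_alt (train_item_count : List (Int × Int)) (thresholds : List Int) : List (String × List String) :=
  if thresholds.length = 0 then []
  else
    let srt := PySem.List.sorted (PySem.Set.ofList thresholds) (fun x => x)
    let st :=
      (PySem.Dict.ofList train_item_count).items.foldl
        (fun (st : List (PySem.Set String) × PySem.Set String) p =>
          let i := pvBisectLoop srt p.2 0 srt.length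
          if i < srt.length then
            (st.1.set i (PySem.Set.add (st.1.getD i PySem.Set.empty) (PySem.Int.toStr p.1)), st.2)
          else (st.1, PySem.Set.add st.2 (PySem.Int.toStr p.1)))
        (srt.map (fun _ => PySem.Set.empty), PySem.Set.empty)
    let out :=
      (srt.zip st.1).foldl
        (fun o tb =>
          o.insert (if tb.1 = 0 then "unseen" else "niche" ++ PySem.Int.toStr tb.1) tb.2)
        PySem.Dict.empty
    (out.insert "seen" st.2).items

-- ===== PRECONDITION & SPEC =====
def Spec_group_item_threshold (train_item_count : List (Int × Int)) (thresholds : List Int) (out : List (String × List String)) : Prop := out = group_item_threshold_alt train_item_count thresholds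
instance (train_item_count : List (Int × Int)) (thresholds : List Int) (out : List (String × List String)) : Decidable (Spec_group_item_threshold train_item_count thresholds out) := by unfold Spec_group_item_threshold; infer_instance

-- ===== CLAIM (what is proved, stated in full; the proofs are below) =====
def Claim_equal_group_item_threshold : Prop := ∀ (train_item_count : List (Int × Int)) (thresholds : List Int), Dom_group_item_threshold train_item_count thresholds → Spec_group_item_threshold train_item_count thresholds (group_item_threshold train_item_count thresholds)

-- ===== LEMMAS AND PROOFS =====

-- the items list both sides' group dictionaries carry: one bucket per distinct threshold, then 'rest'
def pvToItems (U : List Int) (bs : List (PySem.Set String)) (rest : PySem.Set String) :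
    List (GKey × PySem.Set String) :=
  (U.zip bs).map (fun p => (GKey.thr p.1, p.2)) ++ [(GKey.rest, rest)]

theorem pvOfList_sublist {α : Type} [BEq α] [LawfulBEq α] (xs : List α) :
    (PySem.Set.ofList xs).Sublist xs := by
  induction xs with
  | nil => simp [PySem.Set.ofList]
  | cons x xs ih =>
    rw [PySem.Set.ofList_cons]
    exact List.Sublist.cons₂ x (List.Sublist.trans List.filter_sublist ih)

theorem pvDedupSorted (thresholds : List Int) :
    PySem.List.dedup (PySem.List.sorted thresholds (fun x => x)) =
      PySem.List.sorted (PySem.Set.ofList thresholds) (fun x => x) := by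
  refine (PySem.List.sorted_eq_of_perm_of_pairwise_lt _ _ _ ?_ ?_).symm
  · rw [PySem.List.dedup_eq_ofList]
    refine List.perm_of_nodup_nodup_toFinset_eq (PySem.Set.nodup_ofList _)
      (PySem.Set.nodup_ofList _) ?_
    ext a
    simp [PySem.Set.mem_ofList, PySem.List.mem_sorted]
  · have hsub : (PySem.List.dedup (PySem.List.sorted thresholds (fun x => x))).Sublist
        (PySem.List.sorted thresholds (fun x => x)) := by
      rw [PySem.List.dedup_eq_ofList]; exact pvOfList_sublist _
    have hle : (PySem.List.dedup (PySem.List.sorted thresholds (fun x => x))).Pairwise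
        (fun a b => a ≤ b) :=
      List.Pairwise.sublist hsub (PySem.List.sorted_pairwise thresholds (fun x => x))
    have hne : (PySem.List.dedup (PySem.List.sorted thresholds (fun x => x))).Pairwise
        (fun a b => a ≠ b) := by
      rw [← List.nodup_iff_pairwise_ne, PySem.List.dedup_eq_ofList]
      exact PySem.Set.nodup_ofList _
    exact (hle.and hne).imp (fun h => lt_of_le_of_ne h.1 h.2)

theorem pvGroups0_items (l : List Int) :
    ((l.foldl (fun g thr => g.insert (GKey.thr thr) PySem.Set.empty)
        (PySem.Dict.empty : PySem.Dict GKey (PySem.Set String))).items) =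
      (PySem.List.dedup l).map (fun t => (GKey.thr t, PySem.Set.empty)) := by
  induction l using List.reverseRecOn with
  | nil => rfl
  | append_singleton l x ih =>
    rw [List.foldl_append, List.foldl_cons, List.foldl_nil,
      PySem.List.dedup_eq_ofList, PySem.Set.ofList_append_singleton]
    rw [PySem.List.dedup_eq_ofList] at ih
    by_cases hx : x ∈ PySem.Set.ofList l
    · have hcont : (List.foldl (fun g thr => g.insert (GKey.thr thr) PySem.Set.empty)
          (PySem.Dict.empty : PySem.Dict GKey (PySem.Set String)) l).contains (GKey.thr x) = true := by
        rw [PySem.Dict.contains_iff_mem_keys]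
        show GKey.thr x ∈ (PySem.Dict.items _).map (·.1)
        rw [ih]
        simp only [List.map_map]
        simpa using hx
      rw [PySem.Dict.items_insert_of_contains _ _ hcont, ih]
      have hadd : (PySem.Set.ofList l).add x = PySem.Set.ofList l := by
        simp [PySem.Set.add, PySem.Set.contains, hx]
      rw [hadd, List.map_map]
      refine List.map_congr_left ?_
      intro t _
      by_cases h : t = x <;> simp [h]
    · have hcont : (List.foldl (fun g thr => g.insert (GKey.thr thr) PySem.Set.empty)
          (PySem.Dict.empty : PySem.Dict GKey (PySem.Set String)) l).contains (GKey.thr x) = false := by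
        rw [← Bool.not_eq_true, PySem.Dict.contains_iff_mem_keys]
        show ¬ GKey.thr x ∈ (PySem.Dict.items _).map (·.1)
        rw [ih]
        simp only [List.map_map]
        simpa using hx
      rw [PySem.Dict.items_insert_of_not_contains _ _ hcont, ih]
      have hadd : (PySem.Set.ofList l).add x = PySem.Set.ofList l ++ [x] := by
        simp [PySem.Set.add, PySem.Set.contains, hx]
      rw [hadd, List.map_append]
      rfl

theorem pvBisect_spec (U : List Int)
    (hmono : ∀ p q : Nat, p ≤ q → q < U.length → U.getD p 0 ≤ U.getD q 0) (cnt : Int)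
    (lo hi : Nat) (hle : lo ≤ hi) (hhi : hi ≤ U.length)
    (hlow : ∀ j, j < lo → U.getD j 0 < cnt)
    (hhigh : ∀ j, hi ≤ j → j < U.length → cnt ≤ U.getD j 0) :
      (∀ j, j < pvBisectLoop U cnt lo hi → U.getD j 0 < cnt) ∧
      (∀ j, pvBisectLoop U cnt lo hi ≤ j → j < U.length → cnt ≤ U.getD j 0) ∧
      pvBisectLoop U cnt lo hi ≤ hi := by
  rw [pvBisectLoop]
  dsimp only
  split
  · rename_i h
    split
    · rename_i hmid
      have h1 := pvBisect_spec U hmono cnt ((lo + hi) / 2 + 1) hi (by omega) hhi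
        (fun j hj => lt_of_le_of_lt (hmono j ((lo + hi) / 2) (by omega) (by omega)) hmid)
        hhigh
      exact ⟨h1.1, h1.2.1, h1.2.2⟩
    · rename_i hmid
      rw [not_lt] at hmid
      have h2 := pvBisect_spec U hmono cnt lo ((lo + hi) / 2) (by omega) (by omega) hlow
        (fun j hj hjlen => le_trans hmid (hmono ((lo + hi) / 2) j hj hjlen))
      exact ⟨h2.1, h2.2.1, by omega⟩
  · exact ⟨hlow, fun j hj hjlen => hhigh j (by omega) hjlen, hle⟩
termination_by hi - lo
decreasing_by all_goals omega

theorem pvFind?_first (p : Int → Bool) (l : List Int) (i : Nat) (hi : i < l.length)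
    (hbefore : ∀ j, j < i → p (l.getD j 0) = false) (hat : p (l.getD i 0) = true) :
    l.find? p = some (l.getD i 0) := by
  induction l generalizing i with
  | nil => simp at hi
  | cons x xs ih =>
    cases i with
    | zero =>
      simp only [List.getD_cons_zero] at hat ⊢
      simp [hat]
    | succ i =>
      have h0 : p x = false := by simpa using hbefore 0 (Nat.succ_pos i)
      simp only [List.getD_cons_succ] at hat ⊢
      rw [List.find?_cons, h0]
      exact ih i (by simpa using hi) (fun j hj => by simpa using hbefore (j + 1) (by omega)) hat

theorem pvFind?_sorted_min (l : List Int) (h : l.Pairwise (· ≤ ·)) (p : Int → Bool) (a : Int)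
    (hf : l.find? p = some a) : p a = true ∧ a ∈ l ∧ ∀ b ∈ l, p b = true → a ≤ b := by
  rw [List.find?_eq_some_iff_append] at hf
  obtain ⟨hpa, as, bs, rfl, hfail⟩ := hf
  refine ⟨hpa, by simp, ?_⟩
  intro b hb hpb
  rcases List.mem_append.mp hb with hb | hb
  · exact absurd hpb (by simpa using hfail b hb)
  · rcases List.mem_cons.mp hb with rfl | hb
    · exact le_refl _
    · have := (List.pairwise_append.mp h).2.1
      exact (List.pairwise_cons.mp this).1 b hb

theorem pvFind?_sorted_eq (l₁ l₂ : List Int) (h₁ : l₁.Pairwise (· ≤ ·))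
    (h₂ : l₂.Pairwise (· ≤ ·)) (hmem : ∀ x, x ∈ l₁ ↔ x ∈ l₂) (p : Int → Bool) :
    l₁.find? p = l₂.find? p := by
  cases hf1 : l₁.find? p with
  | none =>
    rw [List.find?_eq_none] at hf1
    rw [eq_comm, List.find?_eq_none]
    exact fun x hx => hf1 x ((hmem x).mpr hx)
  | some a =>
    obtain ⟨hpa, ha, hmin⟩ := pvFind?_sorted_min l₁ h₁ p a hf1
    cases hf2 : l₂.find? p with
    | none =>
      rw [List.find?_eq_none] at hf2
      exact absurd hpa (hf2 a ((hmem a).mp ha))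
    | some b =>
      obtain ⟨hpb, hb, hmin'⟩ := pvFind?_sorted_min l₂ h₂ p b hf2
      have : a = b := le_antisymm (hmin b ((hmem b).mpr hb) hpb) (hmin' a ((hmem a).mp ha) hpa)
      rw [this]

theorem pvAddItemA_eq_find (g : PySem.Dict GKey (PySem.Set String)) (k c : Int) (l : List Int) :
    pvAddItemA g k c l =
      match l.find? (fun t => decide (c ≤ t)) with
      | some t => g.modify (GKey.thr t) PySem.Set.empty (fun s => PySem.Set.add s (PySem.Int.toStr k))
      | none => g.modify GKey.rest PySem.Set.empty (fun s => PySem.Set.add s (PySem.Int.toStr k)) := by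
  induction l with
  | nil => rfl
  | cons x xs ih =>
    rw [pvAddItemA, List.find?_cons]
    by_cases h : c ≤ x <;> simp [h, ih]

theorem pvToItems_fst (U : List Int) (bs : List (PySem.Set String)) (rest : PySem.Set String)
    (hlen : bs.length = U.length) :
    (pvToItems U bs rest).map Prod.fst = U.map GKey.thr ++ [GKey.rest] := by
  unfold pvToItems
  rw [List.map_append, List.map_map]
  have : (Prod.fst ∘ fun p : Int × PySem.Set String => (GKey.thr p.1, p.2)) =
      GKey.thr ∘ Prod.fst := rfl
  rw [this, ← List.map_map, List.map_fst_zip (le_of_eq hlen.symm)]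
  rfl

theorem pvToItems_keys_nodup (U : List Int) (bs : List (PySem.Set String))
    (rest : PySem.Set String) (hU : U.Nodup) (hlen : bs.length = U.length) :
    ((pvToItems U bs rest).map Prod.fst).Nodup := by
  rw [pvToItems_fst U bs rest hlen]
  simp only [List.nodup_append]
  refine ⟨hU.map (fun a b h => by cases h; rfl), List.nodup_singleton _, ?_⟩
  intro x hx
  simp only [List.mem_map] at hx
  obtain ⟨t, _, rfl⟩ := hx
  simp

theorem pvMapUpdate (U : List Int) (bs : List (PySem.Set String)) (rest : PySem.Set String)
    (hU : U.Nodup) (hlen : bs.length = U.length) (i : Nat) (hi : i < U.length)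
    (v : PySem.Set String) :
    (pvToItems U bs rest).map
        (fun p => if p.1 == GKey.thr (U.getD i 0) then (GKey.thr (U.getD i 0), v) else p) =
      pvToItems U (bs.set i v) rest := by
  unfold pvToItems
  rw [List.map_append, List.map_map]
  congr 1
  · apply List.ext_getElem
    · simp
    · intro j h1 h2
      have hgd : U.getD i 0 = U[i]'hi := List.getD_eq_getElem U 0 hi
      simp only [List.length_map, List.length_zip] at h1
      simp only [Function.comp_apply, List.getElem_map, List.getElem_zip, List.getElem_set, hgd,
        beq_iff_eq, GKey.thr.injEq]
      by_cases hji : j = i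
      · subst hji
        simp
      · have : U[j]'(by omega) ≠ U[i]'hi := by
          rw [ne_eq, hU.getElem_inj_iff]; exact hji
        simp [this, Ne.symm hji]

theorem pvModifyThr_items (U : List Int) (bs : List (PySem.Set String)) (rest : PySem.Set String)
    (hU : U.Nodup) (hlen : bs.length = U.length)
    (g : PySem.Dict GKey (PySem.Set String)) (hitems : g.items = pvToItems U bs rest)
    (i : Nat) (hi : i < U.length) (f : PySem.Set String → PySem.Set String) :
    (g.modify (GKey.thr (U.getD i 0)) PySem.Set.empty f).items =
      pvToItems U (bs.set i (f (bs.getD i PySem.Set.empty))) rest := by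
  have hib : i < bs.length := by omega
  have hmemit : (GKey.thr (U.getD i 0), bs.getD i PySem.Set.empty) ∈ g.items := by
    rw [hitems]
    unfold pvToItems
    refine List.mem_append_left _ ?_
    rw [List.getD_eq_getElem U 0 hi, List.getD_eq_getElem bs _ hib]
    have hz : i < (U.zip bs).length := by simp; omega
    have heq : (GKey.thr (U[i]'hi), bs[i]'hib) =
        (fun p : Int × PySem.Set String => (GKey.thr p.1, p.2)) ((U.zip bs)[i]'hz) := by
      simp
    rw [heq]
    exact List.mem_map_of_mem (List.getElem_mem _)
  have hnd : g.keys.Nodup := by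
    show (g.items.map Prod.fst).Nodup
    rw [hitems]
    exact pvToItems_keys_nodup U bs rest hU hlen
  have hcont : g.contains (GKey.thr (U.getD i 0)) = true := by
    rw [PySem.Dict.contains_iff_mem_keys]
    show _ ∈ g.items.map Prod.fst
    exact List.mem_map_of_mem (l := g.items) (f := Prod.fst) hmemit
  have hgd : g.getD (GKey.thr (U.getD i 0)) PySem.Set.empty = bs.getD i PySem.Set.empty :=
    PySem.Dict.getD_of_mem_items g hmemit hnd _
  have hdef : g.modify (GKey.thr (U.getD i 0)) PySem.Set.empty f =
      g.insert (GKey.thr (U.getD i 0)) (f (g.getD (GKey.thr (U.getD i 0)) PySem.Set.empty)) := rfl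
  rw [hdef, hgd, PySem.Dict.items_insert_of_contains g _ hcont, hitems,
    pvMapUpdate U bs rest hU hlen i hi]

theorem pvModifyRest_items (U : List Int) (bs : List (PySem.Set String)) (rest : PySem.Set String)
    (hU : U.Nodup) (hlen : bs.length = U.length)
    (g : PySem.Dict GKey (PySem.Set String)) (hitems : g.items = pvToItems U bs rest)
    (f : PySem.Set String → PySem.Set String) :
    (g.modify GKey.rest PySem.Set.empty f).items = pvToItems U bs (f rest) := by
  have hmemit : (GKey.rest, rest) ∈ g.items := by
    rw [hitems]
    exact List.mem_append_right _ (by simp)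
  have hnd : g.keys.Nodup := by
    show (g.items.map Prod.fst).Nodup
    rw [hitems]
    exact pvToItems_keys_nodup U bs rest hU hlen
  have hcont : g.contains GKey.rest = true := by
    rw [PySem.Dict.contains_iff_mem_keys]
    show _ ∈ g.items.map Prod.fst
    exact List.mem_map_of_mem (l := g.items) (f := Prod.fst) hmemit
  have hgd : g.getD GKey.rest PySem.Set.empty = rest :=
    PySem.Dict.getD_of_mem_items g hmemit hnd _
  have hdef : g.modify GKey.rest PySem.Set.empty f =
      g.insert GKey.rest (f (g.getD GKey.rest PySem.Set.empty)) := rfl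
  rw [hdef, hgd, PySem.Dict.items_insert_of_contains g _ hcont, hitems]
  unfold pvToItems
  rw [List.map_append, List.map_map]
  rfl

theorem pvFold (U S : List Int) (hU : U.Pairwise (· < ·)) (hS : S.Pairwise (· ≤ ·))
    (hmem : ∀ x, x ∈ S ↔ x ∈ U) (cnt : Int → Int) (ks : List Int) :
    ∀ (bs : List (PySem.Set String)) (rest : PySem.Set String)
      (g : PySem.Dict GKey (PySem.Set String)),
      bs.length = U.length → g.items = pvToItems U bs rest →
      (ks.foldl (fun g k => pvAddItemA g k (cnt k) S) g).items =
          pvToItems U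
            (ks.foldl (fun st k =>
                let i := pvBisectLoop U (cnt k) 0 U.length
                if i < U.length then
                  (st.1.set i (PySem.Set.add (st.1.getD i PySem.Set.empty) (PySem.Int.toStr k)), st.2)
                else (st.1, PySem.Set.add st.2 (PySem.Int.toStr k))) (bs, rest)).1
            (ks.foldl (fun st k =>
                let i := pvBisectLoop U (cnt k) 0 U.length
                if i < U.length then
                  (st.1.set i (PySem.Set.add (st.1.getD i PySem.Set.empty) (PySem.Int.toStr k)), st.2)
                else (st.1, PySem.Set.add st.2 (PySem.Int.toStr k))) (bs, rest)).2 ∧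
        (ks.foldl (fun st k =>
            let i := pvBisectLoop U (cnt k) 0 U.length
            if i < U.length then
              (st.1.set i (PySem.Set.add (st.1.getD i PySem.Set.empty) (PySem.Int.toStr k)), st.2)
            else (st.1, PySem.Set.add st.2 (PySem.Int.toStr k))) (bs, rest)).1.length = U.length := by
  have hUnd : U.Nodup := by
    rw [List.nodup_iff_pairwise_ne]
    exact hU.imp ne_of_lt
  have hmono : ∀ p q : Nat, p ≤ q → q < U.length → U.getD p 0 ≤ U.getD q 0 := by
    intro p q hpq hq
    rcases eq_or_lt_of_le hpq with rfl | h
    · exact le_refl _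
    · rw [List.getD_eq_getElem U 0 (by omega), List.getD_eq_getElem U 0 hq]
      exact le_of_lt (List.pairwise_iff_getElem.mp hU p q (by omega) hq h)
  induction ks with
  | nil => intro bs rest g hlen hitems; exact ⟨hitems, hlen⟩
  | cons k ks ih =>
    intro bs rest g hlen hitems
    obtain ⟨hbelow, habove, -⟩ := pvBisect_spec U hmono (cnt k) 0 U.length (Nat.zero_le _)
      (le_refl _) (fun j hj => by omega) (fun j hj hjl => by omega)
    have hfindU : S.find? (fun t => decide (cnt k ≤ t)) =
        U.find? (fun t => decide (cnt k ≤ t)) :=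
      pvFind?_sorted_eq S U hS (hU.imp le_of_lt) hmem _
    rw [List.foldl_cons, List.foldl_cons, pvAddItemA_eq_find, hfindU]
    by_cases hilen : pvBisectLoop U (cnt k) 0 U.length < U.length
    · have hfind : U.find? (fun t => decide (cnt k ≤ t)) =
          some (U.getD (pvBisectLoop U (cnt k) 0 U.length) 0) := by
        refine pvFind?_first _ U _ hilen ?_ ?_
        · intro j hj
          simpa using not_le.mpr (hbelow j hj)
        · simpa using habove _ (le_refl _) hilen
      rw [hfind]
      simp only [if_pos hilen]
      exact ih _ _ _ (by simp [hlen]) (pvModifyThr_items U bs rest hUnd hlen g hitems _ hilen _)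
    · have hfind : U.find? (fun t => decide (cnt k ≤ t)) = none := by
        rw [List.find?_eq_none]
        intro x hx
        obtain ⟨j, hj, rfl⟩ := List.getElem_of_mem hx
        have := hbelow j (by omega)
        rw [List.getD_eq_getElem U 0 hj] at this
        simpa using not_le.mpr this
      rw [hfind]
      simp only [if_neg hilen]
      exact ih _ _ _ hlen (pvModifyRest_items U bs rest hUnd hlen g hitems _)

theorem pvRender (U : List Int) (bs : List (PySem.Set String)) (rest : PySem.Set String)
    (hU : U.Nodup) (hlen : bs.length = U.length)
    (groups : PySem.Dict GKey (PySem.Set String)) (hitems : groups.items = pvToItems U bs rest) :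
    groups.keys.foldl
        (fun r gr => r.insert (pvNameA gr) (groups.getD gr PySem.Set.empty))
        (PySem.Dict.empty : PySem.Dict String (PySem.Set String)) =
      ((U.zip bs).foldl
        (fun o tb =>
          o.insert (if tb.1 = 0 then "unseen" else "niche" ++ PySem.Int.toStr tb.1) tb.2)
        PySem.Dict.empty).insert "seen" rest := by
  have hkeys : groups.keys = U.map GKey.thr ++ [GKey.rest] := by
    show groups.items.map Prod.fst = _
    rw [hitems]
    exact pvToItems_fst U bs rest hlen
  have hnd : groups.keys.Nodup := by
    show (groups.items.map Prod.fst).Nodup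
    rw [hitems]
    exact pvToItems_keys_nodup U bs rest hU hlen
  have hgetrest : groups.getD GKey.rest PySem.Set.empty = rest := by
    refine PySem.Dict.getD_of_mem_items groups ?_ hnd _
    rw [hitems]
    exact List.mem_append_right _ (by simp)
  have hUz : U.map GKey.thr = (U.zip bs).map (fun p => GKey.thr p.1) := by
    conv_lhs => rw [← List.map_fst_zip (le_of_eq hlen.symm) (l₁ := U) (l₂ := bs)]
    rw [List.map_map]
    rfl
  rw [hkeys, List.foldl_append, hUz, List.foldl_map]
  rw [PySem.List.foldl_congr_mem _ _
    (fun (o : PySem.Dict String (PySem.Set String)) (tb : Int × PySem.Set String) =>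
      o.insert (if tb.1 = 0 then "unseen" else "niche" ++ PySem.Int.toStr tb.1) tb.2) _ ?_]
  · rw [List.foldl_cons, List.foldl_nil, hgetrest]
    rfl
  · intro acc p hp
    have hgd : groups.getD (GKey.thr p.1) PySem.Set.empty = p.2 := by
      refine PySem.Dict.getD_of_mem_items groups ?_ hnd _
      rw [hitems]
      refine List.mem_append_left _ ?_
      exact List.mem_map_of_mem hp
    rw [hgd]
    rfl

-- ===== VERDICT (by name: the statement is the Claim_ definition above) =====
theorem group_item_threshold_spec : Claim_equal_group_item_threshold := by
  unfold Claim_equal_group_item_threshold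
  intro tic th _
  unfold Spec_group_item_threshold group_item_threshold group_item_threshold_alt
  by_cases h0 : th.length = 0
  · rw [List.length_eq_zero_iff] at h0
    subst h0
    rfl
  · dsimp only
    rw [if_neg h0, if_pos (Nat.pos_of_ne_zero h0)]
    have hUlt := PySem.List.sorted_ofList_pairwise_lt th
    have hUnd : (PySem.List.sorted (PySem.Set.ofList th) (fun x => x)).Nodup := by
      rw [List.nodup_iff_pairwise_ne]
      exact hUlt.imp ne_of_lt
    have hSle := PySem.List.sorted_pairwise th (fun x => x)
    have hmem : ∀ x, x ∈ PySem.List.sorted th (fun x => x) ↔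
        x ∈ PySem.List.sorted (PySem.Set.ofList th) (fun x => x) := by
      intro x
      rw [PySem.List.mem_sorted, PySem.List.mem_sorted, PySem.Set.mem_ofList]
    -- initial state of A's groups dict
    have hg0 : ((List.foldl (fun g thr => g.insert (GKey.thr thr) PySem.Set.empty)
        (PySem.Dict.empty : PySem.Dict GKey (PySem.Set String))
        (PySem.List.sorted th (fun x => x))).insert GKey.rest PySem.Set.empty).items =
        pvToItems (PySem.List.sorted (PySem.Set.ofList th) (fun x => x))
          ((PySem.List.sorted (PySem.Set.ofList th) (fun x => x)).map (fun _ => PySem.Set.empty))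
          PySem.Set.empty := by
      have hbase : (List.foldl (fun g thr => g.insert (GKey.thr thr) PySem.Set.empty)
          (PySem.Dict.empty : PySem.Dict GKey (PySem.Set String))
          (PySem.List.sorted th (fun x => x))).items =
          (PySem.List.sorted (PySem.Set.ofList th) (fun x => x)).map
            (fun t => (GKey.thr t, PySem.Set.empty)) := by
        rw [pvGroups0_items, pvDedupSorted]
      have hcont : (List.foldl (fun g thr => g.insert (GKey.thr thr) PySem.Set.empty)
          (PySem.Dict.empty : PySem.Dict GKey (PySem.Set String))
          (PySem.List.sorted th (fun x => x))).contains GKey.rest = false := by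
        rw [← Bool.not_eq_true, PySem.Dict.contains_iff_mem_keys]
        show ¬ GKey.rest ∈ (PySem.Dict.items _).map Prod.fst
        rw [hbase, List.map_map]
        simp
      rw [PySem.Dict.items_insert_of_not_contains _ _ hcont, hbase]
      unfold pvToItems
      congr 1
      have hzip : (PySem.List.sorted (PySem.Set.ofList th) (fun x => x)).zip
          ((PySem.List.sorted (PySem.Set.ofList th) (fun x => x)).map
            (fun _ => (PySem.Set.empty : PySem.Set String))) =
          (PySem.List.sorted (PySem.Set.ofList th) (fun x => x)).map
            (fun a => (a, (PySem.Set.empty : PySem.Set String))) := by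
        have h := List.zip_map' (f := id) (g := fun _ => (PySem.Set.empty : PySem.Set String))
          (l := PySem.List.sorted (PySem.Set.ofList th) (fun x => x))
        rw [List.map_id] at h
        exact h
      rw [hzip, List.map_map]
      rfl
    -- B's fold runs over the items of the train dict, i.e. over its keys with their counts
    rw [PySem.Dict.items_eq_map_keys (PySem.Dict.ofList tic) (PySem.Dict.nodup_keys_ofList tic) 0,
      List.foldl_map]
    obtain ⟨hfit, hflen⟩ := pvFold (PySem.List.sorted (PySem.Set.ofList th) (fun x => x))
      (PySem.List.sorted th (fun x => x)) hUlt hSle hmem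
      (fun k => (PySem.Dict.ofList tic).getD k 0) (PySem.Dict.ofList tic).keys
      ((PySem.List.sorted (PySem.Set.ofList th) (fun x => x)).map (fun _ => PySem.Set.empty))
      PySem.Set.empty _ (by simp) hg0
    rw [pvRender _ _ _ hUnd hflen _ hfit]
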